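-- pv_equiv track=rewrite | github.com/PINTO0309/UHD | demo_uhd.py | _candidate_sidecar_stems
-- ===== SOURCE A (Python) =====
-- from typing import List, Optional, Tuple
--
-- def _strip_quant_suffix(stem: str) -> str:
--     for suffix in ("_integer_quant", "_full_integer_quant", "_float32"):
--         if stem.endswith(suffix):
--             return stem[: -len(suffix)]
--     return stem
--
-- def _candidate_sidecar_stems(stem: str) -> List[str]:
--     suffixes = (
--         "_with_int16_act",
--         "_int16_act",
--         "_integer_quant",
--         "_full_integer_quant",
--         "_float32",
--         "_nocat",
--         "_noconcat",
--     )
--     stems = {stem, _strip_quant_suffix(stem)}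
--     changed = True
--     while changed:
--         changed = False
--         for s in list(stems):
--             for suf in suffixes:
--                 if s.endswith(suf):
--                     trimmed = s[: -len(suf)]
--                     if trimmed and trimmed not in stems:
--                         stems.add(trimmed)
--                         changed = True
--     return list(stems)
-- ===== SOURCE B (Python) =====
-- def _strip_quant_suffix(stem: str) -> str:
--     for suffix in ("_integer_quant", "_full_integer_quant", "_float32"):
--         if stem.endswith(suffix):
--             return stem[: -len(suffix)]
--     return stem
--
-- def _candidate_sidecar_stems(stem: str):
--     suffixes = (
--         "_with_int16_act",
--         "_int16_act",
--         "_integer_quant",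
--         "_full_integer_quant",
--         "_float32",
--         "_nocat",
--         "_noconcat",
--     )
--     base = _strip_quant_suffix(stem)
--     out = [stem] if base == stem else [stem, base]
--     i = 0
--     while i < len(out):
--         s = out[i]
--         i += 1
--         for suf in suffixes:
--             if s.endswith(suf):
--                 trimmed = s[: -len(suf)]
--                 if trimmed and trimmed not in out:
--                     out.append(trimmed)
--     return out
-- ===== Notes on version B (the rewrite author's own statement) =====
-- stated objective: faster
-- what changed: A repeatedly rescans the whole stem set until a changed-flag stays false; B makes a single pass with a cursor worklist over the output list, examining each discovered stem exactly once, so the outer fixpoint rescan disappears.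
import Mathlib
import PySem

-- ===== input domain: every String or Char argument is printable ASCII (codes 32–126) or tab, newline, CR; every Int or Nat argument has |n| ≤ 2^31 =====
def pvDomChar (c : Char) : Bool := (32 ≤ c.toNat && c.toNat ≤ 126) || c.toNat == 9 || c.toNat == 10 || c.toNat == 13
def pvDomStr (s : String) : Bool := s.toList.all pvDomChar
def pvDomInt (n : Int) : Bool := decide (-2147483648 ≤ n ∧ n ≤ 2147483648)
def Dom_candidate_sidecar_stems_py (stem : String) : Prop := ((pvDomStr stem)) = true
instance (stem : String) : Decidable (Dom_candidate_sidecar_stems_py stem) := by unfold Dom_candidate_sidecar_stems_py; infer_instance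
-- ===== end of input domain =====

-- B replaces A's repeated full-set rescan-until-unchanged fixpoint with a single-visit
-- cursor worklist (each discovered stem is examined exactly once); equal return values are
-- proved below. The Python A returns list(set) in hash order; this item is compared as a set,
-- and the ports list the set's elements in first-insertion order.

-- shared module helpers (both Python versions use the same `_strip_quant_suffix` and suffix tuple)
def pvSuffixes : List String :=
  ["_with_int16_act", "_int16_act", "_integer_quant", "_full_integer_quant",
   "_float32", "_nocat", "_noconcat"]

-- trimmed = s[:-len(suf)]
def pvTrim (s suf : String) : String :=
  PySem.Str.slice s none (some (-(PySem.Str.len suf)))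

-- _strip_quant_suffix: 3-iteration loop with early return, unrolled
def pvStrip (stem : String) : String :=
  if PySem.Str.endswith stem "_integer_quant" = true then pvTrim stem "_integer_quant"
  else if PySem.Str.endswith stem "_full_integer_quant" = true then pvTrim stem "_full_integer_quant"
  else if PySem.Str.endswith stem "_float32" = true then pvTrim stem "_float32"
  else stem

-- ===== PORT A =====
-- inner `for suf in suffixes` body over the live (stems, changed) state
def pvInnerA (s : String) (st : List String × Bool) (suf : String) : List String × Bool :=
  if PySem.Str.endswith s suf = true then
    if pvTrim s suf ≠ "" ∧ pvTrim s suf ∉ st.1 then (st.1 ++ [pvTrim s suf], true) else st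
  else st

-- `for suf in suffixes:` for one s taken from the snapshot list(stems)
def pvElemA (st : List String × Bool) (s : String) : List String × Bool :=
  pvSuffixes.foldl (pvInnerA s) st

-- one full pass `for s in list(stems)` starting from changed = False
def pvPassA (stems : List String) : List String × Bool :=
  stems.foldl pvElemA (stems, false)

-- `while changed:` — the fuel only makes the same loop total; stem.length + 2 passes always suffice
def pvLoopA : Nat → List String → List String
  | 0, stems => stems
  | f + 1, stems =>
      let r := pvPassA stems
      if r.2 then pvLoopA f r.1 else r.1

def candidate_sidecar_stems_py (stem : String) : List String :=
  pvLoopA (stem.toList.length + 2) (PySem.Set.ofList [stem, pvStrip stem])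

-- ===== PORT B =====
-- inner `for suf in suffixes` body over the output list (which is also the membership set)
def pvStep (s : String) (out : List String) (suf : String) : List String :=
  if PySem.Str.endswith s suf = true then
    if pvTrim s suf ≠ "" ∧ pvTrim s suf ∉ out then out ++ [pvTrim s suf] else out
  else out

def pvScanB (out : List String) (s : String) : List String :=
  pvSuffixes.foldl (pvStep s) out

-- `while i < len(out): s = out[i]; i += 1; …` — cursor worklist; the fuel only makes it total
def pvLoopB : Nat → List String → Nat → List String
  | 0, out, _ => out
  | f + 1, out, i =>
      match out[i]? with
      | none => out
      | some s => pvLoopB f (pvScanB out s) (i + 1)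

def candidate_sidecar_stems_py_alt (stem : String) : List String :=
  let base := pvStrip stem
  pvLoopB (stem.toList.length + 2) (if base = stem then [stem] else [stem, base]) 0

-- ===== PRECONDITION & SPEC =====
def Spec_candidate_sidecar_stems_py (stem : String) (out : List String) : Prop := out = candidate_sidecar_stems_py_alt stem
instance (stem : String) (out : List String) : Decidable (Spec_candidate_sidecar_stems_py stem out) := by unfold Spec_candidate_sidecar_stems_py; infer_instance

-- ===== CLAIM (what is proved, stated in full; the proofs are below) =====
def Claim_equal_candidate_sidecar_stems_py : Prop := ∀ (stem : String), Dom_candidate_sidecar_stems_py stem → Spec_candidate_sidecar_stems_py stem (candidate_sidecar_stems_py stem)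

-- ===== LEMMAS AND PROOFS =====

-- the (nonempty) trimmed strings produced from s by the suffix list l
def pvTrims (l : List String) (s : String) : List String :=
  match l with
  | [] => []
  | suf :: rest =>
      if PySem.Str.endswith s suf = true ∧ pvTrim s suf ≠ "" then
        pvTrim s suf :: pvTrims rest s
      else pvTrims rest s

lemma pvTrim_prefix (s suf : String) : (pvTrim s suf).toList <+: s.toList := by
  simp only [pvTrim, PySem.Str.toList_slice, PySem.Chars.slice_eq_listSlice, PySem.List.slice]
  simpa using List.take_prefix _ _

lemma pvStrip_prefix (stem : String) : (pvStrip stem).toList <+: stem.toList := by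
  rw [pvStrip]
  split
  · exact pvTrim_prefix _ _
  · split
    · exact pvTrim_prefix _ _
    · split
      · exact pvTrim_prefix _ _
      · exact List.prefix_refl _

-- scanning one stem is a set-update with its trims
lemma foldStep_eq_update (l : List String) (o : List String) (s : String) :
    l.foldl (pvStep s) o = PySem.Set.update o (pvTrims l s) := by
  induction l generalizing o with
  | nil => simp [pvTrims, PySem.Set.update]
  | cons suf rest ih =>
    rw [List.foldl_cons, pvTrims, ih]
    by_cases he : PySem.Str.endswith s suf = true
    · by_cases ht : pvTrim s suf ≠ ""
      · have hstep : pvStep s o suf = PySem.Set.add o (pvTrim s suf) := by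
          rw [PySem.Set.add_eq_ite, pvStep, if_pos he]
          by_cases hm : pvTrim s suf ∈ o
          · rw [if_neg (by simp [hm]), if_pos hm]
          · rw [if_pos ⟨ht, hm⟩, if_neg hm]
        rw [hstep, if_pos ⟨he, ht⟩, PySem.Set.update_cons]
      · rw [if_neg (by tauto), pvStep, if_pos he, if_neg (by tauto)]
    · rw [if_neg (by tauto), pvStep, if_neg he]

lemma pvScanB_eq_update (o : List String) (s : String) :
    pvScanB o s = PySem.Set.update o (pvTrims pvSuffixes s) := foldStep_eq_update _ _ _

lemma update_prefix {α : Type} [BEq α] [LawfulBEq α] (o : PySem.Set α) (xs : List α) :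
    o <+: PySem.Set.update o xs := by
  rw [PySem.Set.update_eq_append_filter]; exact List.prefix_append _ _

lemma update_of_subset {α : Type} [BEq α] [LawfulBEq α] (o : PySem.Set α) (xs : List α)
    (h : ∀ x ∈ xs, x ∈ o) : PySem.Set.update o xs = o := by
  rw [PySem.Set.update_eq_append_filter]
  simp
  exact h

lemma pvScanB_prefix (o : List String) (s : String) : o <+: pvScanB o s := by
  rw [pvScanB_eq_update]; exact update_prefix _ _

lemma foldStep_prefix (l : List String) (o : List String) (s : String) :
    o <+: l.foldl (pvStep s) o := by
  induction l generalizing o with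
  | nil => exact List.prefix_refl _
  | cons suf rest ih =>
    rw [List.foldl_cons]
    refine List.IsPrefix.trans ?_ (ih _)
    rw [pvStep]
    split
    · split
      · exact List.prefix_append _ _
      · exact List.prefix_refl _
    · exact List.prefix_refl _

lemma foldScan_prefix (q : List String) (o : List String) : o <+: q.foldl pvScanB o := by
  induction q generalizing o with
  | nil => exact List.prefix_refl _
  | cons t q ih => exact (pvScanB_prefix o t).trans (ih _)

lemma foldScan_skip (p : List String) (o : List String)
    (h : ∀ s ∈ p, ∀ t ∈ pvTrims pvSuffixes s, t ∈ o) : p.foldl pvScanB o = o := by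
  induction p with
  | nil => rfl
  | cons s p ih =>
    rw [List.foldl_cons, pvScanB_eq_update, update_of_subset _ _ (h s (by simp))]
    exact ih (fun s hs => h s (by simp [hs]))

lemma foldScan_nodup (q : List String) (o : List String) (h : o.Nodup) :
    (q.foldl pvScanB o).Nodup := by
  induction q generalizing o with
  | nil => exact h
  | cons t q ih =>
    rw [List.foldl_cons]
    exact ih _ (by rw [pvScanB_eq_update]; exact PySem.Set.nodup_update _ _ h)

lemma mem_foldScan_of_mem {q o : List String} {x : String} (h : x ∈ o) :
    x ∈ q.foldl pvScanB o := (foldScan_prefix q o).subset h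

-- after s is scanned, all its trims are present (and stay present)
lemma foldScan_processed (q : List String) (o : List String) (s : String) (hs : s ∈ q) :
    ∀ t ∈ pvTrims pvSuffixes s, t ∈ q.foldl pvScanB o := by
  induction q generalizing o with
  | nil => cases hs
  | cons a q ih =>
    intro t ht
    rw [List.foldl_cons]
    rcases List.mem_cons.mp hs with h1 | h2
    · subst h1
      apply mem_foldScan_of_mem
      rw [pvScanB_eq_update]
      exact (PySem.Set.mem_update _ _ _).mpr (Or.inr ht)
    · exact ih _ h2 t ht

-- a prefix-closed property propagates through the scan fold
lemma foldScan_all {P : String → Prop}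
    (hcl : ∀ s t, P s → t ∈ pvTrims pvSuffixes s → P t) :
    ∀ (q : List String) (o : List String), (∀ x ∈ o, P x) → (∀ x ∈ q, P x) →
      ∀ x ∈ q.foldl pvScanB o, P x := by
  intro q
  induction q with
  | nil => intro o ho _ x hx; exact ho x hx
  | cons a q ih =>
    intro o ho hq x hx
    rw [List.foldl_cons] at hx
    refine ih _ ?_ (fun y hy => hq y (by simp [hy])) x hx
    intro y hy
    rw [pvScanB_eq_update] at hy
    rcases (PySem.Set.mem_update _ _ _).mp hy with h | h
    · exact ho y h
    · exact hcl a y (hq a (by simp)) h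

-- A's inner fold = B's inner fold plus the correct changed flag
lemma innerA_eq (l : List String) (s : String) (o : List String) (c : Bool) :
    l.foldl (pvInnerA s) (o, c)
      = (l.foldl (pvStep s) o, c || decide (o.length < (l.foldl (pvStep s) o).length)) := by
  induction l generalizing o c with
  | nil => simp
  | cons suf rest ih =>
    rw [List.foldl_cons, List.foldl_cons]
    by_cases he : PySem.Str.endswith s suf = true
    · by_cases hg : pvTrim s suf ≠ "" ∧ pvTrim s suf ∉ o
      · have h1 : pvInnerA s (o, c) suf = (o ++ [pvTrim s suf], true) := by
          rw [pvInnerA, if_pos he, if_pos hg]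
        have h2 : pvStep s o suf = o ++ [pvTrim s suf] := by
          rw [pvStep, if_pos he, if_pos hg]
        rw [h1, h2, ih]
        have hlen : (o ++ [pvTrim s suf]).length ≤ (rest.foldl (pvStep s) (o ++ [pvTrim s suf])).length :=
          (foldStep_prefix _ _ _).length_le
        have : o.length < (rest.foldl (pvStep s) (o ++ [pvTrim s suf])).length := by
          simp at hlen; omega
        simp [this]
      · have h1 : pvInnerA s (o, c) suf = (o, c) := by
          rw [pvInnerA, if_pos he, if_neg hg]
        have h2 : pvStep s o suf = o := by
          rw [pvStep, if_pos he, if_neg hg]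
        rw [h1, h2, ih]
    · have h1 : pvInnerA s (o, c) suf = (o, c) := by rw [pvInnerA, if_neg he]
      have h2 : pvStep s o suf = o := by rw [pvStep, if_neg he]
      rw [h1, h2, ih]

lemma elemA_eq (l : List String) (o : List String) (c : Bool) :
    l.foldl pvElemA (o, c)
      = (l.foldl pvScanB o, c || decide (o.length < (l.foldl pvScanB o).length)) := by
  induction l generalizing o c with
  | nil => simp
  | cons s rest ih =>
    rw [List.foldl_cons, List.foldl_cons]
    have h1 : pvElemA (o, c) s = (pvScanB o s, c || decide (o.length < (pvScanB o s).length)) :=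
      innerA_eq _ _ _ _
    rw [h1, ih]
    have hab : o.length ≤ (pvScanB o s).length := (pvScanB_prefix o s).length_le
    have hbc : (pvScanB o s).length ≤ (rest.foldl pvScanB (pvScanB o s)).length :=
      (foldScan_prefix _ _).length_le
    congr 1
    rcases c with _ | _
    · simp
      rw [Bool.eq_iff_iff]
      simp only [Bool.or_eq_true, decide_eq_true_eq]
      omega
    · simp

lemma passA_eq (o : List String) :
    pvPassA o = (o.foldl pvScanB o, decide (o.length < (o.foldl pvScanB o).length)) := by
  rw [pvPassA, elemA_eq]; simp

lemma loopB_done (f i : Nat) (o : List String) (h : o.length ≤ i) :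
    pvLoopB (f + 1) o i = o := by
  rw [pvLoopB]
  rw [List.getElem?_eq_none h]

-- B consumes a chunk of the worklist it has already materialised
lemma chunkB (q : List String) : ∀ (f i : Nat) (acc : List String), q <+: acc.drop i →
    pvLoopB (f + q.length) acc i = pvLoopB f (q.foldl pvScanB acc) (i + q.length) := by
  induction q with
  | nil => intro f i acc _; simp
  | cons t q ih =>
    intro f i acc h
    obtain ⟨r, hr⟩ := h
    have hi : i < acc.length := by
      by_contra hx
      rw [List.drop_eq_nil_of_le (by omega)] at hr
      simp at hr
    have hacc : acc[i]? = some t := by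
      have h0 : (acc.drop i)[0]? = some t := by rw [← hr]; rfl
      rwa [List.getElem?_drop, Nat.add_zero] at h0
    have hlen : (t :: q).length = q.length + 1 := rfl
    rw [hlen, ← Nat.add_assoc]
    rw [pvLoopB, hacc]
    show pvLoopB (f + q.length) (pvScanB acc t) (i + 1) = _
    have hq : q <+: (pvScanB acc t).drop (i + 1) := by
      obtain ⟨w, hw⟩ := pvScanB_prefix acc t
      have hdrop : (pvScanB acc t).drop (i + 1) = acc.drop (i + 1) ++ w := by
        rw [← hw, List.drop_append_of_le_length (by omega)]
      rw [hdrop]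
      have hdd : acc.drop (i + 1) = (acc.drop i).tail := by
        rw [← List.drop_drop, List.drop_one]
      refine List.IsPrefix.trans ?_ (List.prefix_append _ _)
      rw [hdd, ← hr]
      exact ⟨r, rfl⟩
    rw [ih f (i + 1) (pvScanB acc t) hq]
    congr 1
    omega

-- distinct prefixes of cs number at most cs.length + 1
lemma nodup_prefix_bound (cs : List Char) (o : List String) (hnd : o.Nodup)
    (hpre : ∀ s ∈ o, s.toList <+: cs) : o.length ≤ cs.length + 1 := by
  have hinj : ∀ s ∈ o, ∀ t ∈ o, s.toList.length = t.toList.length → s = t := by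
    intro s hs t ht hlen
    have h1 := hpre s hs
    have h2 := hpre t ht
    have h3 := List.prefix_of_prefix_length_le h1 h2 (le_of_eq hlen)
    have heq : s.toList = t.toList := List.IsPrefix.eq_of_length h3 hlen
    exact String.toList_inj.mp heq
  have hmapnd : (o.map (fun s => s.toList.length)).Nodup := by
    rw [List.nodup_map_iff_inj_on hnd]
    exact fun s hs t ht h => hinj s hs t ht h
  have hsub : (o.map (fun s => s.toList.length)) ⊆ List.range (cs.length + 1) := by
    intro n hn
    rw [List.mem_map] at hn
    obtain ⟨s, hs, rfl⟩ := hn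
    rw [List.mem_range]
    have := (hpre s hs).length_le
    omega
  have h1 : (o.map (fun s => s.toList.length)).length ≤ cs.length + 1 := by
    have hc1 := List.toFinset_card_of_nodup hmapnd
    have hc2 : (o.map (fun s => s.toList.length)).toFinset ⊆ (List.range (cs.length + 1)).toFinset := by
      intro x hx
      rw [List.mem_toFinset] at hx ⊢
      exact hsub hx
    have hc3 := Finset.card_le_card hc2
    have hc4 := List.toFinset_card_le (List.range (cs.length + 1))
    have hc5 : (List.map (fun s => s.toList.length) o).length = o.length := List.length_map _
    have hc6 : (List.range (cs.length + 1)).length = cs.length + 1 := List.length_range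
    omega
  simpa using h1

lemma trims_mem_prefix {t s : String} (ht : t ∈ pvTrims pvSuffixes s) : t.toList <+: s.toList := by
  have hgen : ∀ l, t ∈ pvTrims l s → t.toList <+: s.toList := by
    intro l
    induction l with
    | nil => intro h; cases h
    | cons suf rest ih =>
      intro h
      rw [pvTrims] at h
      split at h
      · rcases List.mem_cons.mp h with h1 | h2
        · subst h1; exact pvTrim_prefix s suf
        · exact ih h2
      · exact ih h
  exact hgen pvSuffixes ht

lemma mainLemma (cs : List Char) :
    ∀ (fA : Nat) (fB i : Nat) (o : List String), o.Nodup → (∀ s ∈ o, s.toList <+: cs) →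
      i ≤ o.length → (∀ s ∈ o.take i, ∀ t ∈ pvTrims pvSuffixes s, t ∈ o) →
      cs.length + 1 < o.length + fA → cs.length + 1 < i + fB →
      pvLoopA fA o = pvLoopB fB o i := by
  intro fA
  induction fA with
  | zero =>
    intro fB i o hnd hpre _ _ hfa _
    have := nodup_prefix_bound cs o hnd hpre
    omega
  | succ fA ih =>
    intro fB i o hnd hpre hi hinv hfa hfb
    have hbound := nodup_prefix_bound cs o hnd hpre
    set o' := o.foldl pvScanB o with ho'
    have hsplit : o' = (o.drop i).foldl pvScanB o := by
      have h1 : List.foldl pvScanB o (List.take i o ++ List.drop i o) = List.foldl pvScanB o o := by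
        rw [List.take_append_drop]
      rw [ho', ← h1, List.foldl_append, foldScan_skip _ _ hinv]
    have hA : pvLoopA (fA + 1) o
        = if decide (o.length < o'.length) = true then pvLoopA fA o' else o' := by
      simp only [pvLoopA, passA_eq]
      rw [← ho']
    have hqpre : o.drop i <+: o.drop i := List.prefix_refl _
    have hfb2 : fB = (fB - (o.length - i)) + (o.drop i).length := by
      rw [List.length_drop]; omega
    have hB : pvLoopB fB o i = pvLoopB (fB - (o.length - i)) o' (o.length) := by
      have hidx : i + (o.drop i).length = o.length := by
        rw [List.length_drop]; omega
      conv_lhs => rw [hfb2]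
      rw [chunkB _ _ _ _ hqpre, hidx, ← hsplit]
    have hopre : o <+: o' := foldScan_prefix o o
    by_cases hch : o.length < o'.length
    · -- changed pass: recurse on the grown list, cursor at the old end
      have hnd' : o'.Nodup := foldScan_nodup _ _ hnd
      have hpre' : ∀ s ∈ o', s.toList <+: cs := by
        refine foldScan_all (fun s t hs ht => (trims_mem_prefix ht).trans hs) o o hpre hpre
      have hbound' := nodup_prefix_bound cs o' hnd' hpre'
      have htake : o'.take o.length = o := by
        obtain ⟨r, hr⟩ := hopre
        rw [← hr, List.take_left]
      have hinv' : ∀ s ∈ o'.take o.length, ∀ t ∈ pvTrims pvSuffixes s, t ∈ o' := by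
        rw [htake]
        intro s hs t ht
        by_cases hsi : s ∈ o.take i
        · exact hopre.subset (hinv s hsi t ht)
        · have hsd : s ∈ o.drop i := by
            rcases (List.mem_append.mp (by rw [List.take_append_drop]; exact hs : s ∈ o.take i ++ o.drop i)) with h | h
            · exact absurd h hsi
            · exact h
          rw [hsplit]
          exact foldScan_processed _ _ _ hsd t ht
      have hrec := ih (fB - (o.length - i)) o.length o' hnd' hpre' hopre.length_le hinv'
        (by omega) (by omega)
      rw [hA, if_pos (by simpa using hch), hB, hrec]
    · -- unchanged pass: fixpoint reached; B's cursor is at the end too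
      have hfix : o' = o := (List.IsPrefix.eq_of_length_le hopre (by omega)).symm
      rw [hA, if_neg (by simpa using hch), hB, hfix]
      obtain ⟨g, hg⟩ : ∃ g, fB - (o.length - i) = g + 1 := ⟨fB - (o.length - i) - 1, by omega⟩
      rw [hg, loopB_done _ _ _ (le_refl _)]

lemma ofList_pair (a b : String) :
    PySem.Set.ofList [a, b] = (if b = a then [a] else [a, b]) := by
  have h : PySem.Set.ofList [a, b] = PySem.Set.add (PySem.Set.add PySem.Set.empty a) b := rfl
  rw [h, PySem.Set.add_eq_ite, PySem.Set.add_eq_ite]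
  simp [PySem.Set.empty]

-- ===== VERDICT (by name: the statement is the Claim_ definition above) =====
theorem candidate_sidecar_stems_py_spec : Claim_equal_candidate_sidecar_stems_py := by
  unfold Claim_equal_candidate_sidecar_stems_py
  intro stem _
  unfold Spec_candidate_sidecar_stems_py candidate_sidecar_stems_py candidate_sidecar_stems_py_alt
  rw [ofList_pair]
  refine mainLemma stem.toList _ _ 0 _ ?_ ?_ ?_ ?_ ?_ ?_
  · by_cases hb : pvStrip stem = stem
    · rw [if_pos hb]; simp
    · rw [if_neg hb]
      simp
      exact fun h => hb h.symm
  · intro s hs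
    by_cases hb : pvStrip stem = stem
    · rw [if_pos hb] at hs
      simp at hs
      subst hs; exact List.prefix_refl _
    · rw [if_neg hb] at hs
      rcases List.mem_cons.mp hs with h | h
      · subst h; exact List.prefix_refl _
      · simp at h; subst h; exact pvStrip_prefix stem
  · omega
  · simp
  · have : 1 ≤ (if pvStrip stem = stem then [stem] else [stem, pvStrip stem]).length := by
      by_cases hb : pvStrip stem = stem <;> simp [hb]
    omega
  · omega
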